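-- pv_equiv track=rewrite | github.com/grahamhunter2001/codewars | design_a_simple_automation.py | read_commands
-- ===== SOURCE A (Python) =====
-- def read_commands(commands):
--     pos = "q1"
--     for cmd in commands:
--         if cmd == "0":
--             if pos == "q1":
--                 pos = "q1"
--             elif pos == "q2":
--                 pos = "q3"
--             elif pos == "q3":
--                 pos = "q2"
--         elif cmd == "1":
--             if pos == "q1":
--                 pos = "q2"
--             elif pos == "q2":
--                 pos = "q2"
--             elif pos == "q3":
--                 pos = "q2"
--     return (pos == "q2")
-- ===== SOURCE B (Python) =====
-- def read_commands(commands):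
--     zeros = 0
--     for cmd in reversed(commands):
--         if cmd == "1":
--             return zeros % 2 == 0
--         if cmd == "0":
--             zeros += 1
--     return False
-- ===== Notes on version B (the rewrite author's own statement) =====
-- stated objective: alternative
-- what changed: Replaces the forward three-state automaton simulation with a backward scan that early-returns at the last '1', counting the '0's after it: the result is True iff a '1' exists and that count is even.
import Mathlib
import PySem

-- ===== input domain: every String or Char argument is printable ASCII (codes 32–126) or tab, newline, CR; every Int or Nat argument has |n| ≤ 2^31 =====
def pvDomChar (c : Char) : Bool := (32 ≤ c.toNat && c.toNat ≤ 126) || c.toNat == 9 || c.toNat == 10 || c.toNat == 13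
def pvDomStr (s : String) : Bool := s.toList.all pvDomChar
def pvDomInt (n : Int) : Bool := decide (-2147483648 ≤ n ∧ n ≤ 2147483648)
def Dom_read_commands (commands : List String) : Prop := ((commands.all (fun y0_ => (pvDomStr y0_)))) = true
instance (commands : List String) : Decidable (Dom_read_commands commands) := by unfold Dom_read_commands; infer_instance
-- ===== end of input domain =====

-- B replaces A's forward three-state automaton with a backward scan that counts the '0's
-- after the last '1' and returns True iff a '1' exists and that count is even; objective: alternative.

-- ===== PORT A =====
-- A's loop: state string pos, updated per command by the branch table
def read_commands_step (pos : String) (cmd : String) : String :=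
  if cmd = "0" then
    if pos = "q1" then "q1"
    else if pos = "q2" then "q3"
    else if pos = "q3" then "q2"
    else pos
  else if cmd = "1" then
    if pos = "q1" then "q2"
    else if pos = "q2" then "q2"
    else if pos = "q3" then "q2"
    else pos
  else pos

def read_commands (commands : List String) : Bool :=
  (commands.foldl read_commands_step "q1") = "q2"

-- ===== PORT B =====
-- B's backward scan: walk the reversed list, counting '0's, early return at the first '1' met
def read_commands_alt_go : List String → Int → Bool
  | [], _ => false
  | cmd :: rest, zeros =>
      if cmd = "1" then zeros % 2 == 0
      else if cmd = "0" then read_commands_alt_go rest (zeros + 1)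
      else read_commands_alt_go rest zeros

def read_commands_alt (commands : List String) : Bool :=
  read_commands_alt_go commands.reverse 0

-- ===== PRECONDITION & SPEC =====
def Spec_read_commands (commands : List String) (out : Bool) : Prop := out = read_commands_alt commands
instance (commands : List String) (out : Bool) : Decidable (Spec_read_commands commands out) := by unfold Spec_read_commands; infer_instance

-- ===== CLAIM (what is proved, stated in full; the proofs are below) =====
def Claim_equal_read_commands : Prop := ∀ (commands : List String), Dom_read_commands commands → Spec_read_commands commands (read_commands commands)

-- ===== LEMMAS AND PROOFS =====

-- A's state is always one of the three named states
theorem pvReach (l : List String) :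
    l.foldl read_commands_step "q1" = "q1" ∨ l.foldl read_commands_step "q1" = "q2" ∨
    l.foldl read_commands_step "q1" = "q3" := by
  induction l using List.reverseRecOn with
  | nil => left; rfl
  | append_singleton l c ih =>
      rw [List.foldl_append]
      rcases ih with h | h | h <;> rw [h] <;>
        by_cases h0 : c = "0" <;> by_cases h1 : c = "1" <;>
          simp [read_commands_step, h0, h1]

-- B's backward scan, started with zeros = z, tests whether A ends in q2 (z even) or q3 (z odd)
theorem pvGo (l : List String) (z : Int) :
    read_commands_alt_go l.reverse z =
      if z % 2 = 0 then decide (l.foldl read_commands_step "q1" = "q2")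
      else decide (l.foldl read_commands_step "q1" = "q3") := by
  induction l using List.reverseRecOn generalizing z with
  | nil => split <;> simp [read_commands_alt_go]
  | append_singleton l c ih =>
      rw [List.reverse_append, List.foldl_append]
      simp only [List.reverse_singleton, List.singleton_append]
      rcases pvReach l with h | h | h <;>
        by_cases h1 : c = "1" <;> by_cases h0 : c = "0" <;>
          simp [read_commands_alt_go, read_commands_step, h0, h1, h, ih,
                show ((z + 1) % 2 = 0 ↔ ¬ z % 2 = 0) by omega] <;>
          rcases Int.emod_two_eq z with hz | hz <;>
            simp [Int.dvd_iff_emod_eq_zero, hz]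

-- ===== VERDICT (by name: the statement is the Claim_ definition above) =====
theorem read_commands_spec : Claim_equal_read_commands := by
  intro commands _
  unfold Spec_read_commands read_commands read_commands_alt
  rw [pvGo commands 0]
  simp
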